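-- pv_equiv track=rewrite | github.com/Ajaypandey01/AgriShield | app.py | parse_advisory
-- ===== SOURCE A (Python) =====
-- def parse_advisory(text):
--
--     cause=[]
--     cure=[]
--     prevention=[]
--
--     section=None
--
--     for line in text.split("\n"):
--
--         line=line.strip()
--
--         if "Cause" in line:
--             section="cause"
--             continue
--
--         elif "Cure" in line:
--             section="cure"
--             continue
--
--         elif "Prevention" in line:
--             section="prevention"
--             continue
--
--         if line.startswith("-"):
--
--             point=line.replace("-","").strip()
--
--             if section=="cause":
--                 cause.append(point)
--
--             elif section=="cure":
--                 cure.append(point)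
--
--             elif section=="prevention":
--                 prevention.append(point)
--
--     return cause,cure,prevention
-- ===== SOURCE B (Python) =====
-- def parse_advisory(text):
--     def section_of(line):
--         if "Cause" in line:
--             return "cause"
--         if "Cure" in line:
--             return "cure"
--         if "Prevention" in line:
--             return "prevention"
--         return None
--
--     def split_at_header(ls):
--         for k in range(len(ls)):
--             if section_of(ls[k]) is not None:
--                 return ls[:k], ls[k:]
--         return ls, []
--
--     def bullets(seg):
--         return [l.replace("-", "").strip() for l in seg if l.startswith("-")]
--
--     def parse(ls):
--         _, ls = split_at_header(ls)
--         if not ls: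
--             return [], [], []
--         sec = section_of(ls[0])
--         seg, rest = split_at_header(ls[1:])
--         cause, cure, prevention = parse(rest)
--         pts = bullets(seg)
--         if sec == "cause":
--             return pts + cause, cure, prevention
--         if sec == "cure":
--             return cause, pts + cure, prevention
--         return cause, cure, pts + prevention
--
--     return parse([line.strip() for line in text.split("\n")])
-- ===== Notes on version B (the rewrite author's own statement) =====
-- stated objective: alternative
-- what changed: Replaced A's single stateful line loop (a mutable 'section' variable updated per line) by a segment decomposition: scan for header lines with split_at_header, partition the stripped lines into header-delimited segments, extract each segment's bullets with a comprehension, and extend the bucket chosen by the segment's header.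
import Mathlib
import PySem

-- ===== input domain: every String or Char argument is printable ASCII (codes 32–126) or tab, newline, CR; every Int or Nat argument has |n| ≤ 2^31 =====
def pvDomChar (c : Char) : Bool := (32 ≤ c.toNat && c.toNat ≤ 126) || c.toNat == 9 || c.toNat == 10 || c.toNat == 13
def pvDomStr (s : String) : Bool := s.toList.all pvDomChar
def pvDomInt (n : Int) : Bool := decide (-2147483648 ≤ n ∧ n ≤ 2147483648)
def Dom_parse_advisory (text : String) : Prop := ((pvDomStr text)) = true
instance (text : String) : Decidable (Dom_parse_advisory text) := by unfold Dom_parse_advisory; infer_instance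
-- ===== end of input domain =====

-- B replaces A's single stateful line loop by a header-segment decomposition (same cost; objective: alternative).

-- ===== PORT A =====
-- A's loop body: state is (section, cause, cure, prevention); each raw line is stripped,
-- header checks in priority Cause > Cure > Prevention (each 'continue's), then bullet collection.
def aStep (st : Option String × List String × List String × List String) (line0 : String) :
    Option String × List String × List String × List String :=
  let line := PySem.Str.strip line0
  if PySem.Str.isIn "Cause" line then (some "cause", st.2.1, st.2.2.1, st.2.2.2)
  else if PySem.Str.isIn "Cure" line then (some "cure", st.2.1, st.2.2.1, st.2.2.2)
  else if PySem.Str.isIn "Prevention" line then (some "prevention", st.2.1, st.2.2.1, st.2.2.2)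
  else if PySem.Str.startswith line "-" then
    let point := PySem.Str.strip (PySem.Str.replace line "-" "")
    if st.1 == some "cause" then (st.1, st.2.1 ++ [point], st.2.2.1, st.2.2.2)
    else if st.1 == some "cure" then (st.1, st.2.1, st.2.2.1 ++ [point], st.2.2.2)
    else if st.1 == some "prevention" then (st.1, st.2.1, st.2.2.1, st.2.2.2 ++ [point])
    else st
  else st

def parse_advisory (text : String) : List String × List String × List String :=
  let r := ((PySem.Str.split? text "\n").getD []).foldl aStep (none, [], [], [])
  r.2

-- ===== PORT B =====
-- which section a line starts, if any (priority Cause > Cure > Prevention)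
def sectionOf (line : String) : Option String :=
  if PySem.Str.isIn "Cause" line then some "cause"
  else if PySem.Str.isIn "Cure" line then some "cure"
  else if PySem.Str.isIn "Prevention" line then some "prevention"
  else none

-- Source B's split_at_header: (lines before the first header, remainder starting at it)
def splitAtHeader : List String → List String × List String
  | [] => ([], [])
  | l :: rest =>
    if (sectionOf l).isSome then ([], l :: rest)
    else (l :: (splitAtHeader rest).1, (splitAtHeader rest).2)

-- Source B's bullets comprehension
def bullets (seg : List String) : List String :=
  (seg.filter (fun l => PySem.Str.startswith l "-")).map
    (fun l => PySem.Str.strip (PySem.Str.replace l "-" ""))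

theorem splitAtHeader_snd_len (ls : List String) : (splitAtHeader ls).2.length ≤ ls.length := by
  induction ls with
  | nil => simp [splitAtHeader]
  | cons l rest ih =>
    simp only [splitAtHeader]
    split
    · simp
    · simpa using Nat.le_succ_of_le ih

-- Source B's while loop over header-delimited segments (ls starts with a header line or is empty)
def goB (ls cause cure prevention : List String) : List String × List String × List String :=
  match h : ls with
  | [] => (cause, cure, prevention)
  | hd :: tl =>
    let sec := sectionOf hd
    let pts := bullets (splitAtHeader tl).1
    if sec == some "cause" then goB (splitAtHeader tl).2 (cause ++ pts) cure prevention
    else if sec == some "cure" then goB (splitAtHeader tl).2 cause (cure ++ pts) prevention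
    else goB (splitAtHeader tl).2 cause cure (prevention ++ pts)
termination_by ls.length
decreasing_by
  all_goals simp only [List.length_cons]; exact Nat.lt_succ_of_le (splitAtHeader_snd_len tl)

def parse_advisory_alt (text : String) : List String × List String × List String :=
  let lines := ((PySem.Str.split? text "\n").getD []).map (fun line => PySem.Str.strip line)
  goB (splitAtHeader lines).2 [] [] []

-- ===== PRECONDITION & SPEC =====
def Spec_parse_advisory (text : String) (out : List String × List String × List String) : Prop := out = parse_advisory_alt text
instance (text : String) (out : List String × List String × List String) : Decidable (Spec_parse_advisory text out) := by unfold Spec_parse_advisory; infer_instance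

-- ===== CLAIM (what is proved, stated in full; the proofs are below) =====
def Claim_equal_parse_advisory : Prop := ∀ (text : String), Dom_parse_advisory text → Spec_parse_advisory text (parse_advisory text)

-- ===== LEMMAS AND PROOFS =====

-- A's step on an already-stripped line
def aStepCore (st : Option String × List String × List String × List String) (line : String) :
    Option String × List String × List String × List String :=
  if PySem.Str.isIn "Cause" line then (some "cause", st.2.1, st.2.2.1, st.2.2.2)
  else if PySem.Str.isIn "Cure" line then (some "cure", st.2.1, st.2.2.1, st.2.2.2)
  else if PySem.Str.isIn "Prevention" line then (some "prevention", st.2.1, st.2.2.1, st.2.2.2)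
  else if PySem.Str.startswith line "-" then
    let point := PySem.Str.strip (PySem.Str.replace line "-" "")
    if st.1 == some "cause" then (st.1, st.2.1 ++ [point], st.2.2.1, st.2.2.2)
    else if st.1 == some "cure" then (st.1, st.2.1, st.2.2.1 ++ [point], st.2.2.2)
    else if st.1 == some "prevention" then (st.1, st.2.1, st.2.2.1, st.2.2.2 ++ [point])
    else st
  else st

theorem aStep_eq_core : aStep = fun st l => aStepCore st (PySem.Str.strip l) := rfl

-- B's continuation when the loop starts with section `sec` and accumulators c u p
def injGo (sec : Option String) (c u p : List String) (ms : List String) :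
    List String × List String × List String :=
  let pts := bullets (splitAtHeader ms).1
  if sec == some "cause" then goB (splitAtHeader ms).2 (c ++ pts) u p
  else if sec == some "cure" then goB (splitAtHeader ms).2 c (u ++ pts) p
  else if sec == some "prevention" then goB (splitAtHeader ms).2 c u (p ++ pts)
  else goB (splitAtHeader ms).2 c u p

theorem goB_nil (c u p : List String) : goB [] c u p = (c, u, p) := by
  rw [goB]

theorem goB_cons (l : String) (t c u p : List String) : goB (l :: t) c u p =
    (if sectionOf l == some "cause" then
       goB (splitAtHeader t).2 (c ++ bullets (splitAtHeader t).1) u p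
     else if sectionOf l == some "cure" then
       goB (splitAtHeader t).2 c (u ++ bullets (splitAtHeader t).1) p
     else goB (splitAtHeader t).2 c u (p ++ bullets (splitAtHeader t).1)) := by
  rw [goB]

theorem foldCore_eq (ms : List String) : ∀ (sec : Option String) (c u p : List String),
    (ms.foldl aStepCore (sec, c, u, p)).2 = injGo sec c u p ms := by
  induction ms with
  | nil =>
    intro sec c u p
    simp only [List.foldl_nil, injGo, splitAtHeader, bullets, List.filter_nil, List.map_nil,
      List.append_nil, goB_nil]
    split <;> try rfl
    split <;> try rfl
    split <;> rfl
  | cons l t ih =>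
    intro sec c u p
    by_cases h1 : PySem.Str.isIn "Cause" l = true
    · simp at h1
      simp [List.foldl_cons, aStepCore, h1, ih, injGo, splitAtHeader, sectionOf, goB_cons,
        bullets]
    · simp at h1
      by_cases h2 : PySem.Str.isIn "Cure" l = true
      · simp at h2
        simp [List.foldl_cons, aStepCore, h1, h2, ih, injGo, splitAtHeader, sectionOf, goB_cons,
          bullets]
      · simp at h2
        by_cases h3 : PySem.Str.isIn "Prevention" l = true
        · simp at h3
          simp [List.foldl_cons, aStepCore, h1, h2, h3, ih, injGo, splitAtHeader, sectionOf,
            goB_cons, bullets]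
        · simp at h3
          by_cases hb : PySem.Str.startswith l "-" = true
          · simp at hb
            by_cases hc : sec = some "cause"
            · simp [List.foldl_cons, aStepCore, h1, h2, h3, hb, hc, ih, injGo, splitAtHeader,
                sectionOf, bullets, List.append_assoc]
            · by_cases hu : sec = some "cure"
              · simp [List.foldl_cons, aStepCore, h1, h2, h3, hb, hc, hu, ih, injGo,
                  splitAtHeader, sectionOf, bullets, List.append_assoc]
              · by_cases hp : sec = some "prevention"
                · simp [List.foldl_cons, aStepCore, h1, h2, h3, hb, hc, hu, hp, ih, injGo,
                    splitAtHeader, sectionOf, bullets, List.append_assoc]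
                · simp [List.foldl_cons, aStepCore, h1, h2, h3, hb, hc, hu, hp, ih, injGo,
                    splitAtHeader, sectionOf, bullets]
          · simp at hb
            simp [List.foldl_cons, aStepCore, h1, h2, h3, hb, ih, injGo, splitAtHeader,
              sectionOf, bullets]

-- ===== VERDICT (by name: the statement is the Claim_ definition above) =====
theorem parse_advisory_spec : Claim_equal_parse_advisory := by
  intro text _
  unfold Spec_parse_advisory parse_advisory parse_advisory_alt
  rw [aStep_eq_core, ← List.foldl_map]
  rw [foldCore_eq]
  simp [injGo]
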